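-- pv_equiv track=rewrite | github.com/EVAN96KWON/Coding_Tests | 프로그래머스/unrated/160586. 대충 만든 자판/대충 만든 자판.py | solution
-- ===== SOURCE A (Python) =====
-- def solution(keymap, targets):
--     answer = []
--     _keymap = {}
--     for key in keymap:
--         for i, k in enumerate(key):
--             if k in _keymap:
--                 _keymap[k] = min(_keymap[k], i)
--             else:
--                 _keymap[k] = i
--
--     for target in targets:
--         cnt = 0
--         for t in target:
--             if t not in _keymap:
--                 cnt = -1
--                 break
--             cnt += _keymap[t] + 1
--         answer.append(cnt)
--
--     return answer
-- ===== SOURCE B (Python) =====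
-- def solution(keymap, targets):
--     def best(t):
--         b = -1
--         for key in keymap:
--             for i, k in enumerate(key):
--                 if k == t and (b == -1 or i < b):
--                     b = i
--         return b
--
--     answer = []
--     for target in targets:
--         idxs = [best(t) for t in target]
--         answer.append(-1 if -1 in idxs else sum(idxs) + len(idxs))
--     return answer
-- ===== Notes on version B (the rewrite author's own statement) =====
-- stated objective: alternative
-- what changed: Drops the precomputed per-character minimum-index dict: for each target character B rescans every key string tracking the minimum matching index directly, and combines per-character results with a comprehension (-1 if any is missing, else sum+len) instead of an accumulating break loop.
import Mathlib
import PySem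

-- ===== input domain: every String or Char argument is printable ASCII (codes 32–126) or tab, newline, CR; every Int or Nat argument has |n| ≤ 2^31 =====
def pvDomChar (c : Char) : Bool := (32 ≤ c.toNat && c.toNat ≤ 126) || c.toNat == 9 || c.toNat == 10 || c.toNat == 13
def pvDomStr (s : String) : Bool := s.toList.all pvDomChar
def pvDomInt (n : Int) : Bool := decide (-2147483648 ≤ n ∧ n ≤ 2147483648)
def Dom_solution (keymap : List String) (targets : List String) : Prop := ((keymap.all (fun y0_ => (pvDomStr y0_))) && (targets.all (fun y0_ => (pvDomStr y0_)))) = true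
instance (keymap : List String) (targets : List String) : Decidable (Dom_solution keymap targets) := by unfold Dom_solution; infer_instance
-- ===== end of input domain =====

-- B removes A's precomputed per-character minimum-index dict: it rescans the keymap per target
-- character and combines per-character minima with contains/sum instead of a break loop (alternative decomposition).


-- ===== PORT A =====
-- dict build: for key in keymap: for i, k in enumerate(key): _keymap[k] = min(_keymap[k], i) (or i)
def buildKeymap (keymap : List String) : PySem.Dict Char Int :=
  keymap.foldl (fun d key =>
    (PySem.List.enumerate key.toList).foldl (fun d ik =>
      match d.get? ik.2 with
      | some v => d.insert ik.2 (min v ik.1)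
      | none   => d.insert ik.2 ik.1) d) PySem.Dict.empty

-- inner target loop of A, with the break: cnt = -1 and stop on a missing char
def cntLoop (d : PySem.Dict Char Int) : List Char → Int → Int
  | [], cnt => cnt
  | t :: ts, cnt =>
    match d.get? t with
    | none => -1
    | some v => cntLoop d ts (cnt + v + 1)

def solution (keymap : List String) (targets : List String) : List Int :=
  let _keymap := buildKeymap keymap
  targets.foldl (fun answer target => answer ++ [cntLoop _keymap target.toList 0]) []

-- ===== PORT B =====
-- best(t): scan every key, tracking the minimum index where t occurs (-1 if nowhere)
def bestIdx (keymap : List String) (t : Char) : Int :=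
  keymap.foldl (fun b key =>
    (PySem.List.enumerate key.toList).foldl (fun b ik =>
      if ik.2 == t && (b == -1 || ik.1 < b) then ik.1 else b) b) (-1)

def solution_alt (keymap : List String) (targets : List String) : List Int :=
  targets.foldl (fun answer target =>
    let idxs := target.toList.map (bestIdx keymap)
    answer ++ [if idxs.contains (-1) then -1 else idxs.sum + idxs.length]) []

-- ===== PRECONDITION & SPEC =====
def Spec_solution (keymap : List String) (targets : List String) (out : List Int) : Prop := out = solution_alt keymap targets
instance (keymap : List String) (targets : List String) (out : List Int) : Decidable (Spec_solution keymap targets out) := by unfold Spec_solution; infer_instance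

-- ===== CLAIM (what is proved, stated in full; the proofs are below) =====
def Claim_equal_solution : Prop := ∀ (keymap : List String) (targets : List String), Dom_solution keymap targets → Spec_solution keymap targets (solution keymap targets)

-- ===== LEMMAS AND PROOFS =====

-- decode B's -1 sentinel into A's dict-lookup Option
def decB (b : Int) : Option Int := if b = -1 then none else some b

-- one key: A's dict update and B's running minimum stay in correspondence at each char c
theorem inner_inv (c : Char) (ps : List (Int × Char)) (hps : ∀ p ∈ ps, 0 ≤ p.1) :
    ∀ (d : PySem.Dict Char Int) (b : Int), -1 ≤ b → d.get? c = decB b →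
    (ps.foldl (fun d ik =>
        match d.get? ik.2 with
        | some v => d.insert ik.2 (min v ik.1)
        | none   => d.insert ik.2 ik.1) d).get? c
      = decB (ps.foldl (fun b ik => if ik.2 == c && (b == -1 || ik.1 < b) then ik.1 else b) b)
      ∧ -1 ≤ ps.foldl (fun b ik => if ik.2 == c && (b == -1 || ik.1 < b) then ik.1 else b) b := by
  induction ps with
  | nil => intro d b hb hd; exact ⟨hd, hb⟩
  | cons p ps ih =>
    intro d b hb hd
    obtain ⟨i, k⟩ := p
    have hi : 0 ≤ i := hps (i, k) (by simp)
    have hps' : ∀ p ∈ ps, 0 ≤ p.1 := fun p hp => hps p (by simp [hp])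
    simp only [List.foldl_cons]
    by_cases hk : k = c
    · subst hk
      by_cases hb1 : b = -1
      · subst hb1
        have hd' : d.get? k = none := by simpa [decB] using hd
        simp only [hd']
        have hstep : (if (k == k && ((-1:Int) == (-1:Int) || decide (i < (-1:Int)))) = true then i else (-1:Int)) = i := by simp
        rw [hstep]
        exact ih hps' _ i (by omega)
          (by rw [PySem.Dict.get?_insert_self]; simp [decB, show ¬ i = -1 by omega])
      · have hd' : d.get? k = some b := by simp [decB, hb1] at hd; exact hd
        simp only [hd']
        have hmin : (d.insert k (min b i)).get? k = some (min b i) := PySem.Dict.get?_insert_self d k (min b i)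
        by_cases hlt : i < b
        · have : (if (k == k && (b == -1 || i < b)) = true then i else b) = i := by
            simp [hlt]
          rw [this]
          exact ih hps' _ i (by omega) (by rw [hmin]; simp [decB, min_eq_right (le_of_lt hlt)]; omega)
        · have : (if (k == k && (b == -1 || i < b)) = true then i else b) = b := by
            simp [hlt]; omega
          rw [this]
          exact ih hps' _ b hb (by rw [hmin]; simp [decB, hb1, min_eq_left (by omega : b ≤ i)])
    · have hne : (k == c) = false := by simp [hk]
      have hstep : (if (k == c && (b == -1 || i < b)) = true then i else b) = b := by simp [hne]
      rw [hstep]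
      have hd2 : (match d.get? k with
          | some v => d.insert k (min v i)
          | none   => d.insert k i).get? c = decB b := by
        cases hdk : d.get? k with
        | none =>
          rw [PySem.Dict.get?_insert_of_ne d i (fun h => hk h.symm)]
          exact hd
        | some v =>
          rw [PySem.Dict.get?_insert_of_ne d (min v i) (fun h => hk h.symm)]
          exact hd
      exact ih hps' _ b hb hd2

-- enumerate indices are nonnegative
theorem enumerate_fst_nonneg (cs : List Char) : ∀ p ∈ PySem.List.enumerate cs, 0 ≤ p.1 := by
  intro p hp
  have : p.1 ∈ (PySem.List.enumerate cs).map (·.1) := List.mem_map_of_mem hp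
  rw [PySem.List.map_fst_enumerate] at this
  have := (PySem.List.mem_pyRange_one).1 this
  omega

-- whole keymap: the dict lookup at c equals B's bestIdx, decoded
theorem build_get?_eq (keymap : List String) (c : Char) :
    (buildKeymap keymap).get? c = decB (bestIdx keymap c) := by
  unfold buildKeymap bestIdx
  have main : ∀ (km : List String) (d : PySem.Dict Char Int) (b : Int), -1 ≤ b → d.get? c = decB b →
      (km.foldl (fun d key =>
        (PySem.List.enumerate key.toList).foldl (fun d ik =>
          match d.get? ik.2 with
          | some v => d.insert ik.2 (min v ik.1)
          | none   => d.insert ik.2 ik.1) d) d).get? c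
      = decB (km.foldl (fun b key =>
          (PySem.List.enumerate key.toList).foldl (fun b ik =>
            if ik.2 == c && (b == -1 || ik.1 < b) then ik.1 else b) b) b)
      ∧ -1 ≤ km.foldl (fun b key =>
          (PySem.List.enumerate key.toList).foldl (fun b ik =>
            if ik.2 == c && (b == -1 || ik.1 < b) then ik.1 else b) b) b := by
    intro km
    induction km with
    | nil => intro d b hb hd; exact ⟨hd, hb⟩
    | cons key km ih =>
      intro d b hb hd
      simp only [List.foldl_cons]
      obtain ⟨h1, h2⟩ := inner_inv c (PySem.List.enumerate key.toList)
        (enumerate_fst_nonneg key.toList) d b hb hd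
      exact ih _ _ h2 h1
  exact (main keymap PySem.Dict.empty (-1) (by omega) (by simp [decB, PySem.Dict.get?, PySem.Dict.empty])).1

-- A's break loop equals B's map/contains/sum combination, for one target
theorem cntLoop_eq (keymap : List String) (cs : List Char) :
    ∀ cnt : Int, cntLoop (buildKeymap keymap) cs cnt
      = (if (cs.map (bestIdx keymap)).contains (-1) then -1
         else cnt + (cs.map (bestIdx keymap)).sum + (cs.map (bestIdx keymap)).length) := by
  induction cs with
  | nil => intro cnt; simp [cntLoop]
  | cons t ts ih =>
    intro cnt
    simp only [cntLoop, build_get?_eq keymap t, List.map_cons]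
    by_cases hb : bestIdx keymap t = -1
    · simp [decB, hb]
    · simp only [decB, if_neg hb]
      rw [ih (cnt + bestIdx keymap t + 1)]
      have : (((bestIdx keymap t) :: ts.map (bestIdx keymap)).contains (-1))
           = ((ts.map (bestIdx keymap)).contains (-1)) := by
        simp [Ne.symm hb]
      rw [this]
      split
      · rfl
      · simp [List.sum_cons]
        ring

-- ===== VERDICT (by name: the statement is the Claim_ definition above) =====
-- the two ports agree on every input (Dom is not needed for the equality itself)
theorem sol_eq (keymap : List String) (targets : List String) :
    solution keymap targets = solution_alt keymap targets := by
  unfold solution solution_alt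
  induction targets using List.reverseRecOn with
  | nil => rfl
  | append_singleton ts t ih =>
    simp only [List.foldl_append, List.foldl_cons, List.foldl_nil, ih, cntLoop_eq keymap t.toList 0]
    split
    · rfl
    · simp

theorem solution_spec : Claim_equal_solution := by
  intro keymap targets _
  exact sol_eq keymap targets
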